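-- pv_equiv track=rewrite | github.com/hannulatuomas/AI_Playground | AI Agents/ai-coder-cli/agents/languages/batch/debug_agent.py | _detect_operation
-- ===== SOURCE A (Python) =====
-- def _detect_operation(task: str) -> str:
--     """Detect debug operation from task description."""
--     task_lower = task.lower()
--
--     if any(word in task_lower for word in ['error', 'fail', 'crash']):
--         return 'analyze_error'
--     elif any(word in task_lower for word in ['variable', 'value', 'inspect', '%']):
--         return 'inspect_variables'
--     elif 'syntax' in task_lower or 'validate' in task_lower:
--         return 'validate_syntax'
--     elif 'exit' in task_lower or 'errorlevel' in task_lower or 'return' in task_lower: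
--         return 'debug_exit_code'
--
--     return 'llm_assisted'
-- ===== SOURCE B (Python) =====
-- # Priority-ordered keyword table: (keyword, priority of its operation group).
-- _KW = [
--     ('error', 0), ('fail', 0), ('crash', 0),
--     ('variable', 1), ('value', 1), ('inspect', 1), ('%', 1),
--     ('syntax', 2), ('validate', 2),
--     ('exit', 3), ('errorlevel', 3), ('return', 3),
-- ]
--
-- _OPS = ['analyze_error', 'inspect_variables', 'validate_syntax',
--         'debug_exit_code', 'llm_assisted']
--
--
-- def _priority_at(s: str, i: int) -> int:
--     """Priority of the highest-priority keyword starting at position i (4 if none)."""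
--     for kw, p in _KW:
--         if s.startswith(kw, i):
--             return p
--     return 4
--
--
-- def _detect_operation(task: str) -> str:
--     """Detect debug operation from task description.
--
--     Single left-to-right scan over the positions of the lowered string,
--     keeping the minimum (best) priority of any keyword match seen.
--     """
--     s = task.lower()
--     best = 4
--     for i in range(len(s)):
--         p = _priority_at(s, i)
--         if p < best:
--             best = p
--     return _OPS[best]
-- ===== Notes on version B (the rewrite author's own statement) =====
-- stated objective: alternative
-- what changed: Replaces A's per-keyword substring searches in an if/elif chain by a position-driven single scan: walk the lowered string once, at each index take the priority of the first keyword starting there, keep the minimum priority seen, and index an operation table with it.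
import Mathlib
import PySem

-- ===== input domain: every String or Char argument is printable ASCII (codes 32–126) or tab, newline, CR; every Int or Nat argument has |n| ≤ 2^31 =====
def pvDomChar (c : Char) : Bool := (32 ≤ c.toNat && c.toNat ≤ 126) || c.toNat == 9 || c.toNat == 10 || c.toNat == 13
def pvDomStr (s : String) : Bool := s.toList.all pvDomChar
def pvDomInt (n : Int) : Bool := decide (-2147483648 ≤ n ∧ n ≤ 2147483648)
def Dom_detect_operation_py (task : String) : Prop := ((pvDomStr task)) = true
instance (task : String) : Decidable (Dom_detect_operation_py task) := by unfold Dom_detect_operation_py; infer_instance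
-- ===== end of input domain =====

-- B replaces A's per-keyword substring searches (if/elif chain) by a single position scan
-- of the lowered string keeping the minimum matched keyword priority (alternative; same cost).

-- ===== PORT A =====
def detect_operation_py (task : String) : String :=
  let task_lower := PySem.Str.lower task
  if (["error", "fail", "crash"].any fun word => PySem.Str.isIn word task_lower) then
    "analyze_error"
  else if (["variable", "value", "inspect", "%"].any fun word => PySem.Str.isIn word task_lower) then
    "inspect_variables"
  else if PySem.Str.isIn "syntax" task_lower || PySem.Str.isIn "validate" task_lower then
    "validate_syntax"
  else if PySem.Str.isIn "exit" task_lower || PySem.Str.isIn "errorlevel" task_lower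
       || PySem.Str.isIn "return" task_lower then
    "debug_exit_code"
  else
    "llm_assisted"

-- ===== PORT B =====
-- the keyword table _KW (keyword, priority) in priority order
def pvKW : List (List Char × Nat) :=
  [ (['e', 'r', 'r', 'o', 'r'], 0), (['f', 'a', 'i', 'l'], 0), (['c', 'r', 'a', 's', 'h'], 0),
    (['v', 'a', 'r', 'i', 'a', 'b', 'l', 'e'], 1), (['v', 'a', 'l', 'u', 'e'], 1), (['i', 'n', 's', 'p', 'e', 'c', 't'], 1), (['%'], 1),
    (['s', 'y', 'n', 't', 'a', 'x'], 2), (['v', 'a', 'l', 'i', 'd', 'a', 't', 'e'], 2),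
    (['e', 'x', 'i', 't'], 3), (['e', 'r', 'r', 'o', 'r', 'l', 'e', 'v', 'e', 'l'], 3), (['r', 'e', 't', 'u', 'r', 'n'], 3) ]

-- the operation table _OPS
def pvOpsB : List String :=
  ["analyze_error", "inspect_variables", "validate_syntax", "debug_exit_code", "llm_assisted"]

-- _priority_at: priority of the first keyword starting at position i ('s.startswith(kw, i)'
-- for 0 ≤ i < len(s) is exactly 'startswith on s.drop i'); 4 if none
def pvPriorityAt (s : List Char) (i : Nat) : List (List Char × Nat) → Nat
  | [] => 4
  | kp :: rest =>
      if PySem.Chars.startswith (s.drop i) kp.1 then kp.2 else pvPriorityAt s i rest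

def detect_operation_py_alt (task : String) : String :=
  let s := PySem.Chars.lower task.toList
  let best := (List.range s.length).foldl
    (fun best i =>
      let p := pvPriorityAt s i pvKW
      if p < best then p else best) 4
  -- _OPS[best]: best ≤ 4 always, so the index is in range
  pvOpsB.getD best "llm_assisted"

-- ===== PRECONDITION & SPEC =====
def Spec_detect_operation_py (task : String) (out : String) : Prop := out = detect_operation_py_alt task
instance (task : String) (out : String) : Decidable (Spec_detect_operation_py task out) := by unfold Spec_detect_operation_py; infer_instance

-- ===== CLAIM (what is proved, stated in full; the proofs are below) =====
def Claim_equal_detect_operation_py : Prop := ∀ (task : String), Dom_detect_operation_py task → Spec_detect_operation_py task (detect_operation_py task)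

-- ===== LEMMAS AND PROOFS =====

-- group-match tests at one position (proof helpers)
def pvG0 (s : List Char) (i : Nat) : Bool :=
  PySem.Chars.startswith (s.drop i) ['e', 'r', 'r', 'o', 'r'] ||
  PySem.Chars.startswith (s.drop i) ['f', 'a', 'i', 'l'] ||
  PySem.Chars.startswith (s.drop i) ['c', 'r', 'a', 's', 'h']
def pvG1 (s : List Char) (i : Nat) : Bool :=
  PySem.Chars.startswith (s.drop i) ['v', 'a', 'r', 'i', 'a', 'b', 'l', 'e'] ||
  PySem.Chars.startswith (s.drop i) ['v', 'a', 'l', 'u', 'e'] ||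
  PySem.Chars.startswith (s.drop i) ['i', 'n', 's', 'p', 'e', 'c', 't'] ||
  PySem.Chars.startswith (s.drop i) ['%']
def pvG2 (s : List Char) (i : Nat) : Bool :=
  PySem.Chars.startswith (s.drop i) ['s', 'y', 'n', 't', 'a', 'x'] ||
  PySem.Chars.startswith (s.drop i) ['v', 'a', 'l', 'i', 'd', 'a', 't', 'e']
def pvG3 (s : List Char) (i : Nat) : Bool :=
  PySem.Chars.startswith (s.drop i) ['e', 'x', 'i', 't'] ||
  PySem.Chars.startswith (s.drop i) ['e', 'r', 'r', 'o', 'r', 'l', 'e', 'v', 'e', 'l'] ||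
  PySem.Chars.startswith (s.drop i) ['r', 'e', 't', 'u', 'r', 'n']

lemma pvIf2 (a b : Bool) (k r : Nat) :
    (if a = true then k else if b = true then k else r)
      = (if (a || b) = true then k else r) := by
  cases a <;> cases b <;> simp

lemma pvIf3 (a b c : Bool) (k r : Nat) :
    (if a = true then k else if b = true then k else if c = true then k else r)
      = (if (a || b || c) = true then k else r) := by
  cases a <;> cases b <;> cases c <;> simp

lemma pvIf4 (a b c d : Bool) (k r : Nat) :
    (if a = true then k else if b = true then k else if c = true then k
      else if d = true then k else r)
      = (if (a || b || c || d) = true then k else r) := by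
  cases a <;> cases b <;> cases c <;> cases d <;> simp

lemma pvPriorityAt_eq (s : List Char) (i : Nat) :
    pvPriorityAt s i pvKW =
      if pvG0 s i then 0 else if pvG1 s i then 1 else if pvG2 s i then 2
      else if pvG3 s i then 3 else 4 := by
  simp only [pvKW, pvPriorityAt]
  rw [pvIf3, pvIf4, pvIf2, pvIf3]
  simp only [pvG0, pvG1, pvG2, pvG3]
  rfl

lemma pv_best_char (s : List Char) (n : Nat) :
    (List.range n).foldl
      (fun best i =>
        let p := pvPriorityAt s i pvKW
        if p < best then p else best) 4 =
      if (List.range n).any (pvG0 s) then 0 else if (List.range n).any (pvG1 s) then 1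
      else if (List.range n).any (pvG2 s) then 2
      else if (List.range n).any (pvG3 s) then 3 else 4 := by
  induction n with
  | zero => simp
  | succ n ih =>
      rw [List.range_succ]
      simp only [List.foldl_append, List.foldl_cons, List.foldl_nil, List.any_append,
        List.any_cons, List.any_nil, Bool.or_false]
      rw [ih, pvPriorityAt_eq]
      generalize (List.range n).any (pvG0 s) = a0
      generalize (List.range n).any (pvG1 s) = a1
      generalize (List.range n).any (pvG2 s) = a2
      generalize (List.range n).any (pvG3 s) = a3
      generalize pvG0 s n = g0
      generalize pvG1 s n = g1
      generalize pvG2 s n = g2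
      generalize pvG3 s n = g3
      cases a0 <;> cases a1 <;> cases a2 <;> cases a3 <;> cases g0 <;> cases g1 <;>
        cases g2 <;> cases g3 <;> rfl

lemma pv_exists_startswith_iff (kw s : List Char) (hkw : kw ≠ []) :
    (∃ i < s.length, PySem.Chars.startswith (s.drop i) kw = true) ↔
      PySem.Chars.isIn kw s = true := by
  rw [← PySem.Chars.exists_prefix_drop_iff_isIn]
  constructor
  · rintro ⟨i, _, h⟩
    exact ⟨i, (PySem.Chars.startswith_iff _ _).mp h⟩
  · rintro ⟨j, h⟩
    by_cases hj : j < s.length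
    · exact ⟨j, hj, (PySem.Chars.startswith_iff _ _).mpr h⟩
    · exfalso
      have hd : s.drop j = [] := List.drop_eq_nil_of_le (by omega)
      rw [hd] at h
      exact hkw (List.prefix_nil.mp h)

lemma pv_any_group_iff (s : List Char) (g : List Char → Nat → Bool)
    (kws : List (List Char)) (hkws : ∀ kw ∈ kws, kw ≠ [])
    (hg : ∀ i, g s i = true ↔ ∃ kw ∈ kws, PySem.Chars.startswith (s.drop i) kw = true) :
    (List.range s.length).any (g s) = true ↔
      ∃ kw ∈ kws, PySem.Chars.isIn kw s = true := by
  simp only [List.any_eq_true, List.mem_range, hg]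
  constructor
  · rintro ⟨i, hi, kw, hkw, h⟩
    exact ⟨kw, hkw, (pv_exists_startswith_iff kw s (hkws kw hkw)).mp ⟨i, hi, h⟩⟩
  · rintro ⟨kw, hkw, h⟩
    obtain ⟨i, hi, h'⟩ := (pv_exists_startswith_iff kw s (hkws kw hkw)).mpr h
    exact ⟨i, hi, kw, hkw, h'⟩

-- ===== VERDICT (by name: the statement is the Claim_ definition above) =====
theorem detect_operation_py_spec : Claim_equal_detect_operation_py := by
  intro task _
  unfold Spec_detect_operation_py
  simp only [detect_operation_py, detect_operation_py_alt]
  rw [pv_best_char]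
  have h0 := pv_any_group_iff (PySem.Chars.lower task.toList) pvG0
    [['e', 'r', 'r', 'o', 'r'], ['f', 'a', 'i', 'l'], ['c', 'r', 'a', 's', 'h']] (by decide)
    (by intro i; simp [pvG0, or_assoc])
  have h1 := pv_any_group_iff (PySem.Chars.lower task.toList) pvG1
    [['v', 'a', 'r', 'i', 'a', 'b', 'l', 'e'], ['v', 'a', 'l', 'u', 'e'], ['i', 'n', 's', 'p', 'e', 'c', 't'], ['%']] (by decide)
    (by intro i; simp [pvG1, or_assoc])
  have h2 := pv_any_group_iff (PySem.Chars.lower task.toList) pvG2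
    [['s', 'y', 'n', 't', 'a', 'x'], ['v', 'a', 'l', 'i', 'd', 'a', 't', 'e']] (by decide)
    (by intro i; simp [pvG2])
  have h3 := pv_any_group_iff (PySem.Chars.lower task.toList) pvG3
    [['e', 'x', 'i', 't'], ['e', 'r', 'r', 'o', 'r', 'l', 'e', 'v', 'e', 'l'], ['r', 'e', 't', 'u', 'r', 'n']] (by decide)
    (by intro i; simp [pvG3, or_assoc])
  simp only [List.mem_cons, List.not_mem_nil, or_false, exists_eq_or_imp, exists_eq_left]
    at h0 h1 h2 h3
  simp only [List.any_cons, List.any_nil, Bool.or_eq_true, Bool.or_false,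
    PySem.Str.isIn_eq, PySem.Str.toList_lower]
  split_ifs with p0 p1 p2 p3 q0 q1 q2 q3 <;> simp_all [pvOpsB]
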